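-- pv_equiv track=rewrite | github.com/dunglam0212/PycharmProjects | KTLT/Module2/C29Sort_Negative_Number_in_String/Process.py | NegativeNumberInString
-- ===== SOURCE A (Python) =====
-- def NegativeNumberInString(s):
--     #s = "abc-5xyz-12k9l--p"
--     neg_numbers = []
--     i = 0
--     while i<len(s):
--         try:
--             if int(s[i])%1==0 and s[i-1] == '-':
--                 item = '-' + s[i]
--                 j = i+1
--                 while j<len(s):
--                     try:
--                         if int(s[j])%1==0:
--                             item = item + s[j]
--                             j+=1
--                     except:
--                         j = len(s)
--                 neg_numbers.append(item)
--             i+=1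
--         except:
--             i+=1
--     return neg_numbers
-- ===== SOURCE B (Python) =====
-- def NegativeNumberInString(s):
--     res = []
--     cur = None
--     for i, c in enumerate(s):
--         if '0' <= c <= '9':
--             if cur is not None:
--                 cur += c
--             elif i > 0 and s[i-1] == '-':
--                 cur = '-' + c
--         elif cur is not None:
--             res.append(cur)
--             cur = None
--     if cur is not None:
--         res.append(cur)
--     return res
-- ===== Notes on version B (the rewrite author's own statement) =====
-- stated objective: simpler
-- what changed: A's nested loops (an inner rescan restarting at every digit-run head, with per-character try/except int() tests) are replaced by one stateful linear pass keeping a current-token accumulator flushed on the first non-digit or at end of string.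
-- intended difference: On strings that begin with a digit and end with a dash, A's index i-1 wraps around at i=0 so A prepends a spurious extra token consisting of a minus sign followed by the leading digit run; B only starts a token when an actual preceding dash character exists and omits that token, which is the intended reading of the task (see the pinned witness). — e.g. on NegativeNumberInString("0-"): A returns ["-0"], B returns []
import Mathlib
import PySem

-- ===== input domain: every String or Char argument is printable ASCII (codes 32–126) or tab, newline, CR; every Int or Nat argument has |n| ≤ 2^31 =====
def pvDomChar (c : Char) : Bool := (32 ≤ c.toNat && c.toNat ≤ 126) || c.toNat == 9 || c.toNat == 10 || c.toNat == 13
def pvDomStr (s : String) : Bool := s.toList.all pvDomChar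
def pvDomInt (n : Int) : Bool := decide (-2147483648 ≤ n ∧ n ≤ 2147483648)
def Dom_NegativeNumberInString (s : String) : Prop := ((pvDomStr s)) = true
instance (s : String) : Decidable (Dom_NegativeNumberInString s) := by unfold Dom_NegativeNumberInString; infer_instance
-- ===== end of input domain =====

-- B replaces A's nested scan-and-rescan (with per-character try/except digit tests) by a single
-- stateful pass (objective: simpler; a timing run measured it faster by a constant factor);
-- on strings starting with a digit and ending in a dash it drops A's wraparound token (see D_ below).
-- Loops are ported with a structural fuel parameter (fuel = remaining length bound), exact here.

-- ===== PORT A =====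
-- inner while loop: collect the digit run following position j into item
-- (int(s[j]) succeeds exactly on '0'..'9' for the ASCII domain → Char.isDigit)
def pvInnerA (cs : List Char) (fuel : Nat) (item : List Char) (j : Nat) : List Char :=
  match fuel with
  | 0 => item
  | fuel+1 =>
    if h : j < cs.length then
      if (cs[j]).isDigit then pvInnerA cs fuel (item ++ [cs[j]]) (j+1) else item
    else item

-- outer while loop over i; s[i-1] ported as pyGet? cs (i-1) to keep the negative-index wraparound
def pvOuterA (cs : List Char) (fuel : Nat) (i : Nat) (acc : List (List Char)) : List (List Char) :=
  match fuel with
  | 0 => acc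
  | fuel+1 =>
    if h : i < cs.length then
      if (cs[i]).isDigit then
        if PySem.List.pyGet? cs ((i : Int) - 1) = some '-' then
          pvOuterA cs fuel (i+1) (acc ++ [pvInnerA cs cs.length ['-', cs[i]] (i+1)])
        else pvOuterA cs fuel (i+1) acc
      else pvOuterA cs fuel (i+1) acc
    else acc

def NegativeNumberInString (s : String) : List String :=
  (pvOuterA s.toList s.toList.length 0 []).map String.ofList

-- ===== PORT B =====
-- single pass: cur = token in progress (none when not collecting), res = finished tokens
def pvGoB (cs : List Char) (fuel : Nat) (i : Nat) (cur : Option (List Char))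
    (res : List (List Char)) : List (List Char) :=
  match fuel with
  | 0 =>
    match cur with
    | some t => res ++ [t]
    | none => res
  | fuel+1 =>
    if h : i < cs.length then
      if (cs[i]).isDigit then
        match cur with
        | some t => pvGoB cs fuel (i+1) (some (t ++ [cs[i]])) res
        | none =>
          if hi : 0 < i then
            if cs[i-1]'(by omega) = '-' then pvGoB cs fuel (i+1) (some ['-', cs[i]]) res
            else pvGoB cs fuel (i+1) none res
          else pvGoB cs fuel (i+1) none res
      else
        match cur with
        | some t => pvGoB cs fuel (i+1) none (res ++ [t])
        | none => pvGoB cs fuel (i+1) none res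
    else
      match cur with
      | some t => res ++ [t]
      | none => res

def NegativeNumberInString_alt (s : String) : List String :=
  (pvGoB s.toList s.toList.length 0 none []).map String.ofList

-- ===== PRECONDITION & SPEC =====
-- On strings whose first character is a digit and whose last character is a dash, A's s[i-1]
-- wraps around at i=0 and A prepends a spurious token (a minus sign plus the leading digit
-- run); B only treats a digit as negative when a real preceding dash exists, as intended.
def D_NegativeNumberInString (s : String) : Prop :=
  s.toList ≠ [] ∧ (s.toList.headD ' ').isDigit = true ∧ s.toList.getLastD ' ' = '-'
instance (s : String) : Decidable (D_NegativeNumberInString s) := by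
  unfold D_NegativeNumberInString; infer_instance

def Spec_NegativeNumberInString (s : String) (out : List String) : Prop :=
  ¬ D_NegativeNumberInString s → out = NegativeNumberInString_alt s
instance (s : String) (out : List String) : Decidable (Spec_NegativeNumberInString s out) := by
  unfold Spec_NegativeNumberInString; infer_instance

def pvDiffWitness_NegativeNumberInString : String := "0-"
def pvDiffWitnessOut_NegativeNumberInString : (List String) × (List String) := (["-0"], [])

-- ===== CLAIM (what is proved, stated in full; the proofs are below) =====
def Claim_unchanged_NegativeNumberInString : Prop :=
  ∀ (s : String), Dom_NegativeNumberInString s →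
    Spec_NegativeNumberInString s (NegativeNumberInString s)
def Claim_changed_NegativeNumberInString : Prop :=
  Dom_NegativeNumberInString (pvDiffWitness_NegativeNumberInString) ∧
  D_NegativeNumberInString (pvDiffWitness_NegativeNumberInString) ∧
  NegativeNumberInString (pvDiffWitness_NegativeNumberInString) = pvDiffWitnessOut_NegativeNumberInString.1 ∧
  NegativeNumberInString_alt (pvDiffWitness_NegativeNumberInString) = pvDiffWitnessOut_NegativeNumberInString.2 ∧
  pvDiffWitnessOut_NegativeNumberInString.1 ≠ pvDiffWitnessOut_NegativeNumberInString.2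
def Claim_exact_NegativeNumberInString : Prop :=
  ∀ (s : String), Dom_NegativeNumberInString s → D_NegativeNumberInString s →
    NegativeNumberInString s ≠ NegativeNumberInString_alt s

-- ===== LEMMAS AND PROOFS =====

lemma pvDigit_ne_dash {c : Char} (h : c.isDigit = true) : c ≠ '-' := by
  rintro rfl; simp [Char.isDigit] at h

-- the inner while loop computes the maximal digit run from j appended to item
lemma pvInnerA_eq (cs : List Char) :
    ∀ f j t, cs.length ≤ j + f →
      pvInnerA cs f t j = t ++ (cs.drop j).takeWhile Char.isDigit := by
  intro f
  induction f with
  | zero =>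
    intro j t hf
    simp [pvInnerA]
    intro hl
    exact absurd hl (by omega)
  | succ f ih =>
    intro j t hf
    by_cases h : j < cs.length
    · have hdrop : cs.drop j = cs[j] :: cs.drop (j+1) := List.drop_eq_getElem_cons h
      by_cases hd : (cs[j]).isDigit
      · simp only [pvInnerA, dif_pos h, if_pos hd]
        rw [ih (j+1) _ (by omega), hdrop]
        simp [List.takeWhile, hd]
      · simp only [pvInnerA, dif_pos h, if_neg hd, hdrop]
        simp [List.takeWhile, hd]
    · simp [pvInnerA, h]

-- the accumulator of the outer loop is a prefix of the result
lemma pvOuterA_acc (cs : List Char) :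
    ∀ f i acc, pvOuterA cs f i acc = acc ++ pvOuterA cs f i [] := by
  intro f
  induction f with
  | zero => intro i acc; simp [pvOuterA]
  | succ f ih =>
    intro i acc
    by_cases h : i < cs.length
    · by_cases hd : (cs[i]).isDigit
      · by_cases hp : PySem.List.pyGet? cs ((i : Int) - 1) = some '-'
        · simp only [pvOuterA, dif_pos h, if_pos hd, if_pos hp]
          rw [ih (i+1) ([] ++ _), ih (i+1) (acc ++ _)]
          simp
        · simp only [pvOuterA, dif_pos h, if_pos hd, if_neg hp]
          exact ih (i+1) acc
      · simp only [pvOuterA, dif_pos h, if_neg hd]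
        exact ih (i+1) acc
    · simp [pvOuterA, h]

-- combined loop correspondence, for i ≥ 1:
-- (N) B with no token in progress equals A;
-- (S) B collecting t (previous char a digit) equals A with the finished token appended.
lemma pvBoth (cs : List Char) :
    ∀ f i, cs.length ≤ i + f → 1 ≤ i →
      ((∀ acc, pvGoB cs f i none acc = pvOuterA cs f i acc) ∧
       (∀ t acc, ((cs.getD (i-1) ' ').isDigit = true) →
          pvGoB cs f i (some t) acc
            = pvOuterA cs f i (acc ++ [t ++ (cs.drop i).takeWhile Char.isDigit]))) := by
  intro f
  induction f with
  | zero =>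
    intro i hf hi
    have h : ¬ i < cs.length := by omega
    constructor
    · intro acc; simp [pvGoB, pvOuterA]
    · intro t acc _
      simp [pvGoB, pvOuterA]
      intro hl
      exact absurd hl (by omega)
  | succ f ih =>
    intro i hf hi
    by_cases h : i < cs.length
    · have hdrop : cs.drop i = cs[i] :: cs.drop (i+1) := List.drop_eq_getElem_cons h
      have ih' := ih (i+1) (by omega) (by omega)
      constructor
      · -- N case
        intro acc
        by_cases hd : (cs[i]).isDigit
        · have hprev : PySem.List.pyGet? cs ((i : Int) - 1) = cs[i-1]? := by
            have : ((i : Int) - 1) = ((i - 1 : Nat) : Int) := by omega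
            rw [this, PySem.List.pyGet?_natCast]
          have hi1 : i - 1 < cs.length := by omega
          by_cases hp : cs[i-1]'(by omega) = '-'
          · -- A starts a token via the inner loop; B starts collecting
            have hA : PySem.List.pyGet? cs ((i : Int) - 1) = some '-' := by
              rw [hprev, List.getElem?_eq_getElem hi1, hp]
            simp only [pvGoB, pvOuterA, dif_pos h, if_pos hd, dif_pos (by omega : 0 < i),
              if_pos hp, if_pos hA]
            rw [(ih'.2) ['-', cs[i]] acc (by simp [h, hd]),
              pvInnerA_eq cs cs.length (i+1) _ (by omega)]
          · have hA : ¬ PySem.List.pyGet? cs ((i : Int) - 1) = some '-' := by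
              rw [hprev, List.getElem?_eq_getElem hi1]
              simpa using hp
            simp only [pvGoB, pvOuterA, dif_pos h, if_pos hd, dif_pos (by omega : 0 < i),
              if_neg hp, if_neg hA]
            exact ih'.1 acc
        · simp only [pvGoB, pvOuterA, dif_pos h, if_neg hd]
          exact ih'.1 acc
      · -- S case
        intro t acc hprevd
        by_cases hd : (cs[i]).isDigit
        · -- both extend the run; A skips since the previous char is a digit, not '-'
          have hi1 : i - 1 < cs.length := by omega
          have hA : ¬ PySem.List.pyGet? cs ((i : Int) - 1) = some '-' := by
            have hcast : ((i : Int) - 1) = ((i - 1 : Nat) : Int) := by omega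
            rw [hcast, PySem.List.pyGet?_natCast, List.getElem?_eq_getElem hi1]
            have := pvDigit_ne_dash (by simpa [List.getD_eq_getElem, hi1] using hprevd)
            simpa using this
          simp only [pvGoB, pvOuterA, dif_pos h, if_pos hd, if_neg hA]
          rw [(ih'.2) (t ++ [cs[i]]) acc (by simp [h, hd]), hdrop]
          simp [List.takeWhile, hd]
        · -- run ends: B flushes t, A's finished token is exactly t
          simp only [pvGoB, pvOuterA, dif_pos h, if_neg hd]
          rw [ih'.1 (acc ++ [t]), hdrop]
          simp [List.takeWhile, hd]
    · constructor
      · intro acc; simp [pvGoB, pvOuterA, h]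
      · intro t acc _
        simp [pvGoB, pvOuterA, h]

-- A's wraparound read s[-1] at i = 0 is exactly the last character
lemma pvWrap_iff (c : Char) (cs' : List Char) :
    PySem.List.pyGet? (c :: cs') (((0:Nat) : Int) - 1) = some '-'
      ↔ (c :: cs').getLastD ' ' = '-' := by
  rw [show ((0:Nat) : Int) - 1 = -1 by norm_num, PySem.List.pyGet?_neg_one]
  rcases hg : (c :: cs').getLast? with _ | x
  · simp at hg
  · simp [List.getLastD_eq_getLast?, hg]

-- ===== VERDICT (by name: the statement is the Claim_ definition above) =====
theorem NegativeNumberInString_spec : Claim_unchanged_NegativeNumberInString := by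
  intro s _ hnD
  simp only [NegativeNumberInString, NegativeNumberInString_alt]
  congr 1
  rcases hcs : s.toList with _ | ⟨c, cs'⟩
  · rfl
  · unfold D_NegativeNumberInString at hnD
    rw [hcs] at hnD
    have hN := (pvBoth (c :: cs') cs'.length 1 (by simp) (by omega)).1
    by_cases hd : c.isDigit
    · have hw : ¬ PySem.List.pyGet? (c :: cs') (((0:Nat) : Int) - 1) = some '-' := by
        intro hcon
        exact hnD ⟨by simp, by simpa using hd, (pvWrap_iff c cs').mp hcon⟩
      simp only [pvOuterA, pvGoB, List.length_cons, dif_pos (by omega : 0 < cs'.length + 1)]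
      simp only [List.getElem_cons_zero, hd, if_true, if_neg hw]
      rw [dif_neg (by omega : ¬ (0:Nat) < 0)]
      exact (hN []).symm
    · simp only [pvOuterA, pvGoB, List.length_cons, dif_pos (by omega : 0 < cs'.length + 1)]
      simp only [List.getElem_cons_zero, hd]
      simp only [Bool.false_eq_true, if_false]
      exact (hN []).symm

theorem NegativeNumberInString_changed : Claim_changed_NegativeNumberInString := by
  unfold Claim_changed_NegativeNumberInString; decide

theorem NegativeNumberInString_tight : Claim_exact_NegativeNumberInString := by
  intro s _ hDs heq
  obtain ⟨hne, hhd, hlast⟩ := hDs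
  rcases hcs : s.toList with _ | ⟨c, cs'⟩
  · exact hne (by rw [hcs])
  · rw [hcs] at hhd hlast
    have hd : c.isDigit := by simpa using hhd
    have hw : PySem.List.pyGet? (c :: cs') (((0:Nat) : Int) - 1) = some '-' :=
      (pvWrap_iff c cs').mpr hlast
    have hN := (pvBoth (c :: cs') cs'.length 1 (by simp) (by omega)).1 []
    have hAcc := pvOuterA_acc (c :: cs') cs'.length 1
    have hA : NegativeNumberInString s
        = String.ofList (pvInnerA (c :: cs') (cs'.length + 1) ['-', c] 1)
          :: (pvOuterA (c :: cs') cs'.length 1 []).map String.ofList := by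
      simp only [NegativeNumberInString, hcs]
      simp only [pvOuterA, List.length_cons, dif_pos (by omega : 0 < cs'.length + 1),
        List.getElem_cons_zero, hd, if_true, if_pos hw]
      simp only [Nat.zero_add]
      rw [hAcc ([] ++ [pvInnerA (c :: cs') (cs'.length + 1) ['-', c] 1])]
      simp
    have hB : NegativeNumberInString_alt s
        = (pvOuterA (c :: cs') cs'.length 1 []).map String.ofList := by
      simp only [NegativeNumberInString_alt, hcs]
      simp only [pvGoB, List.length_cons, dif_pos (by omega : 0 < cs'.length + 1),
        List.getElem_cons_zero, hd, if_true]
      rw [dif_neg (by omega : ¬ (0:Nat) < 0), hN]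
    rw [hA, hB] at heq
    have := congrArg List.length heq
    simp at this
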